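-- pv_equiv track=rewrite | github.com/dplocki/advent-of-code | 2018_21.py | replace_reg_with_letters
-- ===== SOURCE A (Python) =====
-- def replace_reg_with_letters(result: str):
--     to_replace = {
--         f'reg[{i}]': l
--         for i, l in zip(range(6), 'ABCDEF')
--     }
--
--     for f, t in to_replace.items():
--         result = result.replace(f, t)
--
--     return result
-- ===== SOURCE B (Python) =====
-- def replace_reg_with_letters(result: str):
--     out = []
--     i = 0
--     n = len(result)
--     while i < n:
--         if i + 5 < n and result.startswith('reg[', i) and '0' <= result[i + 4] <= '5' and result[i + 5] == ']':
--             out.append('ABCDEF'[ord(result[i + 4]) - 48])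
--             i += 6
--         else:
--             out.append(result[i])
--             i += 1
--     return ''.join(out)
-- ===== Notes on version B (the rewrite author's own statement) =====
-- stated objective: alternative
-- what changed: Replaces six sequential full-string replace passes (each building a new intermediate string) with a single left-to-right scan that recognises the six register tokens in place and emits the matching letter.
import Mathlib
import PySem

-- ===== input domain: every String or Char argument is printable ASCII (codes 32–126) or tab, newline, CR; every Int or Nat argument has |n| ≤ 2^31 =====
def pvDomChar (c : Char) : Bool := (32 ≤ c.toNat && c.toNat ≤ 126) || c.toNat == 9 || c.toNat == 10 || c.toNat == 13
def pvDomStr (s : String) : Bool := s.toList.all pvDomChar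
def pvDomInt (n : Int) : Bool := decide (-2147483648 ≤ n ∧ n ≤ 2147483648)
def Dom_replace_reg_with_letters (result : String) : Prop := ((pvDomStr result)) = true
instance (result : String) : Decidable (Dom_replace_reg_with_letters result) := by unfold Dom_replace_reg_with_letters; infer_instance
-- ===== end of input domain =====

-- B replaces A's six sequential full-string .replace passes with a single left-to-right scan.

-- ===== PORT A =====
def replace_reg_with_letters (result : String) : String :=
  let to_replace : PySem.Dict String String :=
    PySem.Dict.ofList
      (((PySem.List.pyRange 0 6 1).zip "ABCDEF".toList).map
        (fun il => ("reg[" ++ PySem.Int.toStr il.1 ++ "]", String.ofList [il.2])))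
  to_replace.items.foldl (fun r ft => PySem.Str.replace r ft.1 ft.2) result

-- ===== PORT B =====
def pvAltGo : List Char → List Char
  | 'r' :: 'e' :: 'g' :: '[' :: d :: ']' :: rest =>
      if '0' ≤ d && d ≤ '5'
      then ("ABCDEF".toList.getD (d.toNat - 48) ' ') :: pvAltGo rest
      else 'r' :: pvAltGo ('e' :: 'g' :: '[' :: d :: ']' :: rest)
  | c :: cs => c :: pvAltGo cs
  | [] => []

def replace_reg_with_letters_alt (result : String) : String :=
  String.ofList (pvAltGo result.toList)

-- ===== PRECONDITION & SPEC =====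
def Spec_replace_reg_with_letters (result : String) (out : String) : Prop := out = replace_reg_with_letters_alt result
instance (result : String) (out : String) : Decidable (Spec_replace_reg_with_letters result out) := by unfold Spec_replace_reg_with_letters; infer_instance

-- ===== CLAIM (what is proved, stated in full; the proofs are below) =====
def Claim_equal_replace_reg_with_letters : Prop := ∀ (result : String), Dom_replace_reg_with_letters result → Spec_replace_reg_with_letters result (replace_reg_with_letters result)

-- ===== LEMMAS AND PROOFS =====

-- single-pattern Python str.replace, fuel-free
def pvRepl1 (old new : List Char) : List Char → List Char
  | [] => []
  | c :: t =>
      if old.isPrefixOf (c :: t)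
      then new ++ pvRepl1 old new (List.drop (old.length - 1) t)
      else c :: pvRepl1 old new t
termination_by l => l.length
decreasing_by
  · simpa using Nat.lt_succ_of_le (List.length_drop (l := t) (i := old.length - 1) ▸ Nat.sub_le _ _)
  · simp

theorem pvGo_eq (old new : List Char) (hold : old ≠ []) :
    ∀ fuel l acc, l.length ≤ fuel →
      PySem.Chars.replace.go old new fuel l acc = acc.reverse ++ pvRepl1 old new l := by
  intro fuel
  induction fuel with
  | zero =>
      intro l acc h
      have : l = [] := List.eq_nil_of_length_eq_zero (Nat.le_zero.mp h)
      subst this; simp [PySem.Chars.replace.go, pvRepl1]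
  | succ n ih =>
      intro l acc h
      cases l with
      | nil => simp [PySem.Chars.replace.go, pvRepl1]
      | cons c t =>
          rw [PySem.Chars.replace.go]
          by_cases hp : old.isPrefixOf (c :: t)
          · rw [if_pos hp]
            have hdrop : List.drop old.length (c :: t) = List.drop (old.length - 1) t := by
              cases old with
              | nil => exact absurd rfl hold
              | cons _ _ => simp
            rw [hdrop, ih _ _ (by simp at h ⊢; have := List.length_drop (l := t) (i := old.length - 1); omega)]
            rw [pvRepl1, if_pos hp]
            simp
          · rw [if_neg hp, ih _ _ (by simp at h ⊢; omega)]
            rw [pvRepl1, if_neg hp]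
            simp

theorem pvReplace_eq (s old new : List Char) (hold : old ≠ []) :
    PySem.Chars.replace s old new = pvRepl1 old new s := by
  rw [PySem.Chars.replace, if_neg (by simpa using hold)]
  simpa using pvGo_eq old new hold s.length s [] (le_refl _)

-- if the single replacement char a does not occur in q, an occurrence of q
-- at the head of the replaced string was already there
theorem pvReflect (old : List Char) (a : Char) (t : List Char) :
    ∀ q : List Char, a ∉ q →
      List.isPrefixOf q (pvRepl1 old [a] t) → List.isPrefixOf q t := by
  induction t using pvRepl1.induct (old := old) with
  | case1 =>
      intro q _ h
      simpa [pvRepl1] using h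
  | case2 c t hp _ =>
      intro q ha h
      rw [pvRepl1, if_pos hp] at h
      cases q with
      | nil => simp
      | cons x q' =>
          simp at h
          exact absurd h.1 (by intro hx; exact ha (by simp [hx]))
  | case3 c t hp ih =>
      intro q ha h
      rw [pvRepl1, if_neg hp] at h
      cases q with
      | nil => simp
      | cons x q' =>
          rw [List.isPrefixOf_iff_prefix, List.cons_prefix_cons] at h ⊢
          refine ⟨h.1, ?_⟩
          have := ih q' (fun hm => ha (by simp [hm]))
            (by rw [List.isPrefixOf_iff_prefix]; exact h.2)
          rwa [List.isPrefixOf_iff_prefix] at this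

theorem pvRepl1_cons_of_not_prefix (old new : List Char) (c : Char) (t : List Char)
    (h : ¬ List.isPrefixOf old (c :: t)) :
    pvRepl1 old new (c :: t) = c :: pvRepl1 old new t := by
  rw [pvRepl1, if_neg h]

-- the six-stage chain: A's value, on char lists
def pvChain (s : List Char) : List Char :=
  pvRepl1 ['r','e','g','[','5',']'] ['F'] (pvRepl1 ['r','e','g','[','4',']'] ['E']
    (pvRepl1 ['r','e','g','[','3',']'] ['D'] (pvRepl1 ['r','e','g','[','2',']'] ['C']
      (pvRepl1 ['r','e','g','[','1',']'] ['B'] (pvRepl1 ['r','e','g','[','0',']'] ['A'] s)))))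

theorem pvChain_cons (c : Char) (t : List Char)
    (h : ∀ d : Char, '0' ≤ d → d ≤ '5' → ¬ List.isPrefixOf ['r','e','g','[',d,']'] (c :: t)) :
    pvChain (c :: t) = c :: pvChain t := by
  unfold pvChain
  have e0 : pvRepl1 ['r','e','g','[','0',']'] ['A'] (c :: t)
      = c :: pvRepl1 ['r','e','g','[','0',']'] ['A'] t :=
    pvRepl1_cons_of_not_prefix _ _ _ _ (h '0' (by decide) (by decide))
  rw [e0]
  have e1 : pvRepl1 ['r','e','g','[','1',']'] ['B'] (c :: pvRepl1 ['r','e','g','[','0',']'] ['A'] t)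
      = c :: pvRepl1 ['r','e','g','[','1',']'] ['B'] (pvRepl1 ['r','e','g','[','0',']'] ['A'] t) := by
    refine pvRepl1_cons_of_not_prefix _ _ _ _ (fun hp => h '1' (by decide) (by decide) ?_)
    rw [← e0] at hp
    exact pvReflect _ 'A' _ _ (by decide) hp
  rw [e1]
  have e2 : pvRepl1 ['r','e','g','[','2',']'] ['C']
        (c :: pvRepl1 ['r','e','g','[','1',']'] ['B'] (pvRepl1 ['r','e','g','[','0',']'] ['A'] t))
      = c :: pvRepl1 ['r','e','g','[','2',']'] ['C']
        (pvRepl1 ['r','e','g','[','1',']'] ['B'] (pvRepl1 ['r','e','g','[','0',']'] ['A'] t)) := by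
    refine pvRepl1_cons_of_not_prefix _ _ _ _ (fun hp => h '2' (by decide) (by decide) ?_)
    rw [← e1, ← e0] at hp
    exact pvReflect _ 'A' _ _ (by decide) (pvReflect _ 'B' _ _ (by decide) hp)
  rw [e2]
  have e3 : pvRepl1 ['r','e','g','[','3',']'] ['D']
        (c :: pvRepl1 ['r','e','g','[','2',']'] ['C'] (pvRepl1 ['r','e','g','[','1',']'] ['B']
          (pvRepl1 ['r','e','g','[','0',']'] ['A'] t)))
      = c :: pvRepl1 ['r','e','g','[','3',']'] ['D']
        (pvRepl1 ['r','e','g','[','2',']'] ['C'] (pvRepl1 ['r','e','g','[','1',']'] ['B']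
          (pvRepl1 ['r','e','g','[','0',']'] ['A'] t))) := by
    refine pvRepl1_cons_of_not_prefix _ _ _ _ (fun hp => h '3' (by decide) (by decide) ?_)
    rw [← e2, ← e1, ← e0] at hp
    exact pvReflect _ 'A' _ _ (by decide) (pvReflect _ 'B' _ _ (by decide)
      (pvReflect _ 'C' _ _ (by decide) hp))
  rw [e3]
  have e4 : pvRepl1 ['r','e','g','[','4',']'] ['E']
        (c :: pvRepl1 ['r','e','g','[','3',']'] ['D'] (pvRepl1 ['r','e','g','[','2',']'] ['C']
          (pvRepl1 ['r','e','g','[','1',']'] ['B'] (pvRepl1 ['r','e','g','[','0',']'] ['A'] t))))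
      = c :: pvRepl1 ['r','e','g','[','4',']'] ['E']
        (pvRepl1 ['r','e','g','[','3',']'] ['D'] (pvRepl1 ['r','e','g','[','2',']'] ['C']
          (pvRepl1 ['r','e','g','[','1',']'] ['B'] (pvRepl1 ['r','e','g','[','0',']'] ['A'] t)))) := by
    refine pvRepl1_cons_of_not_prefix _ _ _ _ (fun hp => h '4' (by decide) (by decide) ?_)
    rw [← e3, ← e2, ← e1, ← e0] at hp
    exact pvReflect _ 'A' _ _ (by decide) (pvReflect _ 'B' _ _ (by decide)
      (pvReflect _ 'C' _ _ (by decide) (pvReflect _ 'D' _ _ (by decide) hp)))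
  rw [e4]
  have e5 : pvRepl1 ['r','e','g','[','5',']'] ['F']
        (c :: pvRepl1 ['r','e','g','[','4',']'] ['E'] (pvRepl1 ['r','e','g','[','3',']'] ['D']
          (pvRepl1 ['r','e','g','[','2',']'] ['C'] (pvRepl1 ['r','e','g','[','1',']'] ['B']
            (pvRepl1 ['r','e','g','[','0',']'] ['A'] t)))))
      = c :: pvRepl1 ['r','e','g','[','5',']'] ['F']
        (pvRepl1 ['r','e','g','[','4',']'] ['E'] (pvRepl1 ['r','e','g','[','3',']'] ['D']
          (pvRepl1 ['r','e','g','[','2',']'] ['C'] (pvRepl1 ['r','e','g','[','1',']'] ['B']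
            (pvRepl1 ['r','e','g','[','0',']'] ['A'] t))))) := by
    refine pvRepl1_cons_of_not_prefix _ _ _ _ (fun hp => h '5' (by decide) (by decide) ?_)
    rw [← e4, ← e3, ← e2, ← e1, ← e0] at hp
    exact pvReflect _ 'A' _ _ (by decide) (pvReflect _ 'B' _ _ (by decide)
      (pvReflect _ 'C' _ _ (by decide) (pvReflect _ 'D' _ _ (by decide)
        (pvReflect _ 'E' _ _ (by decide) hp))))
  rw [e5]

theorem pvAltGo_cons (c : Char) (cs : List Char)
    (h1 : ∀ (d : Char) (rest : List Char),
      c = 'r' → cs = 'e' :: 'g' :: '[' :: d :: ']' :: rest → False) :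
    pvAltGo (c :: cs) = c :: pvAltGo cs := by
  rw [pvAltGo.eq_def]
  split
  · rename_i d rest heq
    injection heq with hc hcs
    exact (h1 d rest hc hcs).elim
  · rename_i x c' cs' heq
    injection heq with hc hcs
    rw [hc, hcs]
  · rename_i heq
    exact absurd heq (by simp)

theorem pvChain_eq_altGo : ∀ s : List Char, pvChain s = pvAltGo s := by
  intro s
  induction s using pvAltGo.induct with
  | case1 d rest hd ih =>
      have hd' : ('0' ≤ d ∧ d ≤ '5') := by simpa using hd
      have hdig : d = '0' ∨ d = '1' ∨ d = '2' ∨ d = '3' ∨ d = '4' ∨ d = '5' := by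
        have h1 : 48 ≤ d.toNat := hd'.1
        have h2 : d.toNat ≤ 53 := hd'.2
        have hv : d.toNat = 48 ∨ d.toNat = 49 ∨ d.toNat = 50 ∨ d.toNat = 51 ∨
            d.toNat = 52 ∨ d.toNat = 53 := by omega
        rcases hv with h | h | h | h | h | h
        · exact Or.inl (by rw [← Char.ofNat_toNat d, h])
        · exact Or.inr (Or.inl (by rw [← Char.ofNat_toNat d, h]))
        · exact Or.inr (Or.inr (Or.inl (by rw [← Char.ofNat_toNat d, h])))
        · exact Or.inr (Or.inr (Or.inr (Or.inl (by rw [← Char.ofNat_toNat d, h]))))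
        · exact Or.inr (Or.inr (Or.inr (Or.inr (Or.inl (by rw [← Char.ofNat_toNat d, h])))))
        · exact Or.inr (Or.inr (Or.inr (Or.inr (Or.inr (by rw [← Char.ofNat_toNat d, h])))))
      rcases hdig with rfl | rfl | rfl | rfl | rfl | rfl <;>
        · rw [pvAltGo]
          rw [← ih]
          simp only [pvChain]
          simp [pvRepl1, List.isPrefixOf]
  | case2 d rest hd ih =>
      rw [pvAltGo, if_neg hd, ← ih]
      refine pvChain_cons _ _ ?_
      intro e h0 h5 hp
      have he : e = d := by simpa [List.isPrefixOf] using hp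
      subst he
      exact hd (by simp [h0, h5])
  | case3 c cs h1 ih =>
      have hnp : ∀ d : Char, '0' ≤ d → d ≤ '5' → ¬ List.isPrefixOf ['r','e','g','[',d,']'] (c :: cs) := by
        intro d _ _ hp
        rw [List.isPrefixOf_iff_prefix] at hp
        rcases hp with ⟨u, hu⟩
        simp at hu
        exact h1 d u hu.1.symm hu.2.symm
      rw [pvChain_cons c cs hnp, ih, pvAltGo_cons c cs h1]
  | case4 => simp [pvChain, pvAltGo, pvRepl1]

theorem pvA_eq_chain (s : String) :
    replace_reg_with_letters s = String.ofList (pvChain s.toList) := by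
  have hitems :
      (PySem.Dict.ofList
        (((PySem.List.pyRange 0 6 1).zip "ABCDEF".toList).map
          (fun il => ("reg[" ++ PySem.Int.toStr il.1 ++ "]", String.ofList [il.2])))).items
      = [("reg[0]", "A"), ("reg[1]", "B"), ("reg[2]", "C"),
         ("reg[3]", "D"), ("reg[4]", "E"), ("reg[5]", "F")] := by decide
  rw [replace_reg_with_letters]
  rw [hitems]
  simp only [List.foldl]
  simp only [PySem.Str.replace, String.toList_ofList]
  rw [pvReplace_eq _ _ _ (by decide), pvReplace_eq _ _ _ (by decide),
      pvReplace_eq _ _ _ (by decide), pvReplace_eq _ _ _ (by decide),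
      pvReplace_eq _ _ _ (by decide), pvReplace_eq _ _ _ (by decide)]
  rfl

-- ===== VERDICT (by name: the statement is the Claim_ definition above) =====
theorem replace_reg_with_letters_spec : Claim_equal_replace_reg_with_letters := by
  intro result _
  unfold Spec_replace_reg_with_letters replace_reg_with_letters_alt
  rw [pvA_eq_chain, pvChain_eq_altGo]
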